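-- pv_equiv track=rewrite | github.com/samucj73/Test-rouket | Lotofoda.py | _tem_dois_blocos
-- ===== SOURCE A (Python) =====
-- def _tem_dois_blocos(jogo):
--     """Verifica se tem pelo menos 2 blocos consecutivos diferentes"""
--     nums = sorted(jogo)
--     blocos = []
--     atual = 1
--
--     for i in range(len(nums) - 1):
--         if nums[i+1] - nums[i] == 1:
--             atual += 1
--         else:
--             if atual >= 2:
--                 blocos.append(atual)
--             atual = 1
--
--     # Verificar último bloco
--     if atual >= 2:
--         blocos.append(atual)
--
--     # Para 13+: precisa de 1 bloco longo (≥3) e 1 bloco curto (2)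
--     return len(blocos) >= 2 and max(blocos) >= 3
-- ===== SOURCE B (Python) =====
-- def _tem_dois_blocos(jogo):
--     """Verifica se tem pelo menos 2 blocos consecutivos diferentes"""
--     nums = sorted(jogo)
--     # steps[i] is True iff nums[i] and nums[i+1] are consecutive integers
--     steps = [b - a == 1 for a, b in zip(nums, nums[1:])]
--     # a block of length >= 2 is a maximal stretch of True steps: count its
--     # rising edges; a block of length >= 3 is an edge followed by another step
--     starts = [s and not p for p, s in zip([False] + steps, steps)]
--     longs = [st and n for st, n in zip(starts, steps[1:] + [False])]
--     return sum(starts) >= 2 and any(longs)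
-- ===== Notes on version B (the rewrite author's own statement) =====
-- stated objective: alternative
-- what changed: B never builds or counts run lengths: it derives the boolean step vector of the sorted list and does rising-edge detection with shifted zips, counting edges (blocks >= 2) and testing for an edge followed by another step (a block >= 3).
import Mathlib
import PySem

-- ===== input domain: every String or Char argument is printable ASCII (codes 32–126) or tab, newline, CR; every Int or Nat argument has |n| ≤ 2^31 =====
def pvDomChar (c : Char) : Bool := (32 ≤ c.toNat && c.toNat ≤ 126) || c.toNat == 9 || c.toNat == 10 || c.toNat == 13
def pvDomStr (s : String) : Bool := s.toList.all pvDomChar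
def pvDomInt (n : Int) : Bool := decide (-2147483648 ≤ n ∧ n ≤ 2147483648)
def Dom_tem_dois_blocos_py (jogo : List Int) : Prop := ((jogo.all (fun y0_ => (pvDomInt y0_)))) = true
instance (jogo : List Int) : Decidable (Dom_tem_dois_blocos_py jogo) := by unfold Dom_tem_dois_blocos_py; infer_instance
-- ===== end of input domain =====

-- B drops A's stateful run-length counter: it builds the boolean step vector of the sorted
-- list and detects rising edges with shifted zips (alternative decomposition, same cost).

-- ===== PORT A =====
def tem_dois_blocos_py (jogo : List Int) : Bool :=
  let nums := PySem.List.sorted jogo (fun x => x) false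
  -- for i in range(len(nums)-1): …  (indices always in range, so pyGetD's default is never used)
  let st := (PySem.List.pyRange 0 ((nums.length : Int) - 1) 1).foldl
    (fun (st : List Int × Int) i =>
      if PySem.List.pyGetD nums (i + 1) 0 - PySem.List.pyGetD nums i 0 = 1 then
        (st.1, st.2 + 1)
      else
        ((if 2 ≤ st.2 then st.1 ++ [st.2] else st.1), 1))
    ([], 1)
  let blocos := if 2 ≤ st.2 then st.1 ++ [st.2] else st.1
  decide (2 ≤ blocos.length) && decide (3 ≤ (PySem.List.max? blocos (fun x => x)).getD 0)

-- ===== PORT B =====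
def tem_dois_blocos_py_alt (jogo : List Int) : Bool :=
  let nums := PySem.List.sorted jogo (fun x => x) false
  -- steps = [b - a == 1 for a, b in zip(nums, nums[1:])]
  let steps := (nums.zip (nums.drop 1)).map (fun p => decide (p.2 - p.1 = 1))
  -- starts = [s and not p for p, s in zip([False] + steps, steps)]
  let starts := ((false :: steps).zip steps).map (fun p => p.2 && !p.1)
  -- longs = [st and n for st, n in zip(starts, steps[1:] + [False])]
  let longs := (starts.zip (steps.drop 1 ++ [false])).map (fun p => p.1 && p.2)
  decide (2 ≤ starts.count true) && longs.any id

-- ===== PRECONDITION & SPEC =====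
def Spec_tem_dois_blocos_py (jogo : List Int) (out : Bool) : Prop := out = tem_dois_blocos_py_alt jogo
instance (jogo : List Int) (out : Bool) : Decidable (Spec_tem_dois_blocos_py jogo out) := by unfold Spec_tem_dois_blocos_py; infer_instance

-- ===== CLAIM (what is proved, stated in full; the proofs are below) =====
def Claim_equal_tem_dois_blocos_py : Prop := ∀ (jogo : List Int), Dom_tem_dois_blocos_py jogo → Spec_tem_dois_blocos_py jogo (tem_dois_blocos_py jogo)

-- ===== LEMMAS AND PROOFS =====

-- fold over adjacent pairs of prev :: xs
def pvAdjFold {σ : Type} (g : σ → Int → Int → σ) : Int → List Int → σ → σ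
  | _, [], st => st
  | prev, y :: ys, st => pvAdjFold g y ys (g st prev y)

-- A's index loop, rephrased as a fold over adjacent pairs
theorem pv_idx_fold {σ : Type} (g : σ → Int → Int → σ) :
    ∀ (xs : List Int) (prev : Int) (st : σ),
      (List.range xs.length).foldl
          (fun s k => g s ((prev :: xs).getD k 0) ((prev :: xs).getD (k + 1) 0)) st
        = pvAdjFold g prev xs st := by
  intro xs
  induction xs with
  | nil => intro prev st; simp [pvAdjFold]
  | cons y ys ih =>
    intro prev st
    simp only [List.length_cons, List.range_succ_eq_map, List.foldl_cons, List.foldl_map]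
    simp only [List.getD, List.getElem?_cons_zero, List.getElem?_cons_succ, Option.getD_some]
    have := ih y (g st prev y)
    simpa [pvAdjFold, List.getD] using this

theorem pv_pyrange_fold {σ : Type} (g : σ → Int → Int → σ) (nums : List Int) (st : σ) :
    (PySem.List.pyRange 0 ((nums.length : Int) - 1) 1).foldl
        (fun s i => g s (PySem.List.pyGetD nums i 0) (PySem.List.pyGetD nums (i + 1) 0)) st
      = (List.range (nums.length - 1)).foldl
          (fun s k => g s (nums.getD k 0) (nums.getD (k + 1) 0)) st := by
  simp only [PySem.List.pyRange_one, List.foldl_map, sub_zero, zero_add]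
  have hn : ((nums.length : Int) - 1).toNat = nums.length - 1 := by omega
  rw [hn]
  have hfg : (fun (s : σ) (k : Nat) =>
        g s (PySem.List.pyGetD nums (k : Int) 0) (PySem.List.pyGetD nums ((k : Int) + 1) 0))
      = fun (s : σ) (k : Nat) => g s (nums.getD k 0) (nums.getD (k + 1) 0) := by
    funext s k
    have h2 : ((k : Int) + 1) = (((k + 1 : Nat)) : Int) := by push_cast; ring
    rw [h2, PySem.List.pyGetD_natCast, PySem.List.pyGetD_natCast]
  rw [hfg]

-- the run-length recursion on the sorted values (cnt = length of the current run so far)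
def pvValsGo : Int → Int → List Int → List Int
  | _, cnt, [] => [cnt]
  | prev, cnt, y :: ys => if y - prev = 1 then pvValsGo y (cnt + 1) ys else cnt :: pvValsGo y 1 ys

-- A's loop body
def pvGA (st : List Int × Int) (a b : Int) : List Int × Int :=
  if b - a = 1 then (st.1, st.2 + 1) else ((if 2 ≤ st.2 then st.1 ++ [st.2] else st.1), 1)

theorem pv_main :
    ∀ (xs : List Int) (prev : Int) (blocos : List Int) (atual : Int),
      (if 2 ≤ (pvAdjFold pvGA prev xs (blocos, atual)).2 then
          (pvAdjFold pvGA prev xs (blocos, atual)).1 ++ [(pvAdjFold pvGA prev xs (blocos, atual)).2]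
        else (pvAdjFold pvGA prev xs (blocos, atual)).1)
        = blocos ++ (pvValsGo prev atual xs).filter (fun r => decide (2 ≤ r)) := by
  intro xs
  induction xs with
  | nil =>
    intro prev blocos atual
    simp only [pvAdjFold, pvValsGo, List.filter]
    by_cases h : 2 ≤ atual <;> simp [h]
  | cons y ys ih =>
    intro prev blocos atual
    simp only [pvAdjFold, pvValsGo, pvGA]
    by_cases h : y - prev = 1
    · rw [if_pos h, if_pos h]
      exact ih y blocos (atual + 1)
    · rw [if_neg h, if_neg h]
      rw [ih y (if 2 ≤ atual then blocos ++ [atual] else blocos) 1]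
      by_cases h2 : 2 ≤ atual <;> simp [h2, List.filter]

-- the boolean step vector of prev :: xs
def pvSteps : Int → List Int → List Bool
  | _, [] => []
  | prev, y :: ys => decide (y - prev = 1) :: pvSteps y ys

theorem pv_steps_eq : ∀ (xs : List Int) (prev : Int),
    ((prev :: xs).zip xs).map (fun p => decide (p.2 - p.1 = 1)) = pvSteps prev xs := by
  intro xs
  induction xs with
  | nil => intro prev; simp [pvSteps]
  | cons y ys ih => intro prev; simp [pvSteps, ih y]

-- number of rising edges, given whether the previous step was True
def pvNStarts : Bool → List Bool → Nat
  | _, [] => 0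
  | p, s :: rest => (if s && !p then 1 else 0) + pvNStarts s rest

theorem pv_count_starts : ∀ (bs : List Bool) (p0 : Bool),
    ((((p0 :: bs).zip bs).map (fun p => p.2 && !p.1)).count true) = pvNStarts p0 bs := by
  intro bs
  induction bs with
  | nil => intro p0; simp [pvNStarts]
  | cons s rest ih =>
    intro p0
    simp only [List.zip_cons_cons, List.map_cons, List.count_cons, pvNStarts, ih s]
    by_cases h : (s && !p0) = true <;> simp [h] <;> omega

-- rising edge followed by another step, scanned left to right
def pvEl : Bool → List Bool → Bool
  | _, [] => false
  | p, s :: rest => ((s && !p) && rest.headD false) || pvEl s rest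

theorem pv_any_longs : ∀ (bs : List Bool) (p0 : Bool),
    (((((p0 :: bs).zip bs).map (fun p => p.2 && !p.1)).zip (bs.drop 1 ++ [false])).map
        (fun p => p.1 && p.2)).any id = pvEl p0 bs := by
  intro bs
  induction bs with
  | nil => intro p0; simp [pvEl]
  | cons s rest ih =>
    intro p0
    cases rest with
    | nil => simp [pvEl]
    | cons r rr =>
      have hih := ih s
      simp only [List.zip_cons_cons, List.map_cons, List.drop_succ_cons, List.drop_zero,
        List.cons_append, List.any_cons, id] at hih ⊢
      have e1 : pvEl p0 (s :: r :: rr) = (((s && !p0) && (r :: rr).headD false) || pvEl s (r :: rr)) := rfl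
      rw [e1, List.headD_cons, ← hih]

-- membership-style reading of A's 'max(blocos) >= 3' (also correct for the empty list)
theorem pv_max_ge3 (l : List Int) :
    decide (3 ≤ (PySem.List.max? l (fun x => x)).getD 0) = l.any (fun r => decide (3 ≤ r)) := by
  cases hm : PySem.List.max? l (fun x => x) with
  | none =>
    have hnil : l = [] := (PySem.List.max?_eq_none_iff l _).mp hm
    subst hnil; simp
  | some m =>
    have hmem : m ∈ l := PySem.List.max?_mem hm
    have hmax := PySem.List.max?_isMax hm
    simp only [Option.getD_some]
    rw [Bool.eq_iff_iff]
    simp only [decide_eq_true_eq, List.any_eq_true]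
    constructor
    · intro h; exact ⟨m, hmem, h⟩
    · rintro ⟨r, hr, hge⟩
      have := hmax r hr
      omega

-- run count ≥2 ⟷ rising-edge count
theorem pv_filter_len : ∀ (xs : List Int) (prev c : Int), 1 ≤ c →
    ((pvValsGo prev c xs).filter (fun r => decide (2 ≤ r))).length
      = pvNStarts (decide (2 ≤ c)) (pvSteps prev xs) + (if 2 ≤ c then 1 else 0) := by
  intro xs
  induction xs with
  | nil =>
    intro prev c _
    simp only [pvValsGo, pvSteps, pvNStarts, List.filter]
    by_cases h : 2 ≤ c <;> simp [h]
  | cons y ys ih =>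
    intro prev c hc
    simp only [pvValsGo, pvSteps, pvNStarts]
    by_cases h : y - prev = 1
    · rw [if_pos h, decide_eq_true h]
      rw [ih y (c + 1) (by omega)]
      have h1 : decide (2 ≤ c + 1) = true := by simp only [decide_eq_true_eq]; omega
      have h2 : (if 2 ≤ c + 1 then 1 else 0) = 1 := by rw [if_pos (show 2 ≤ c + 1 by omega)]
      rw [h1, h2]
      by_cases hp : 2 ≤ c
      · simp [hp]
      · simp [hp]
        omega
    · rw [if_neg h, decide_eq_false h]
      by_cases hp : 2 ≤ c <;> simp [hp, ih y 1 (by omega)]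

-- a run ≥3 is in particular ≥2, so A's max over the FILTERED list sees it
theorem pv_any_filter (l : List Int) :
    (l.filter (fun r => decide (2 ≤ r))).any (fun r => decide (3 ≤ r))
      = l.any (fun r => decide (3 ≤ r)) := by
  induction l with
  | nil => simp
  | cons a t ih =>
    by_cases h2 : 2 ≤ a
    · simp [h2, ih]
    · have h3 : ¬3 ≤ a := by omega
      simp [h2, h3, ih]

-- run ≥3 ⟷ scanning the step vector with the current run length
def pvHd : Int → List Bool → Bool
  | c, [] => decide (3 ≤ c)
  | c, s :: rest => if s then pvHd (c + 1) rest else decide (3 ≤ c) || pvHd 1 rest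

theorem pv_any3_hd : ∀ (xs : List Int) (prev c : Int),
    (pvValsGo prev c xs).any (fun r => decide (3 ≤ r)) = pvHd c (pvSteps prev xs) := by
  intro xs
  induction xs with
  | nil => intro prev c; simp [pvValsGo, pvSteps, pvHd]
  | cons y ys ih =>
    intro prev c
    simp only [pvValsGo, pvSteps, pvHd]
    by_cases h : y - prev = 1
    · rw [if_pos h, decide_eq_true h, if_pos rfl]
      exact ih y (c + 1)
    · rw [if_neg h, decide_eq_false h]
      simp only [List.any_cons, if_neg (Bool.false_ne_true)]
      rw [ih y 1]

theorem pv_hd_el : ∀ (bs : List Bool) (c : Int), 1 ≤ c →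
    pvHd c bs
      = (pvEl (decide (2 ≤ c)) bs || (decide (2 ≤ c) && bs.headD false) || decide (3 ≤ c)) := by
  intro bs
  induction bs with
  | nil => intro c _; simp [pvHd, pvEl]
  | cons s rest ih =>
    intro c hc
    simp only [pvHd, pvEl, List.headD_cons]
    cases s with
    | true =>
      rw [if_pos rfl, ih (c + 1) (by omega)]
      have h1 : decide (2 ≤ c + 1) = true := by simp only [decide_eq_true_eq]; omega
      have h2 : decide (3 ≤ c + 1) = decide (2 ≤ c) := decide_eq_decide.mpr (by omega)
      rw [h1, h2]
      by_cases hp : 2 ≤ c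
      · have hq : decide (2 ≤ c) = true := by simp only [decide_eq_true_eq]; omega
        rw [hq]
        cases pvEl true rest <;> cases rest.headD false <;> simp
      · have hq : decide (2 ≤ c) = false := by simp only [decide_eq_false_iff_not]; omega
        have h5 : decide (3 ≤ c) = false := by simp only [decide_eq_false_iff_not]; omega
        rw [hq, h5]
        cases pvEl true rest <;> cases rest.headD false <;> simp
    | false =>
      rw [if_neg (Bool.false_ne_true), ih 1 (by omega)]
      have hq2 : decide ((2:Int) ≤ 1) = false := by simp only [decide_eq_false_iff_not]; omega
      have hq3 : decide ((3:Int) ≤ 1) = false := by simp only [decide_eq_false_iff_not]; omega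
      rw [hq2, hq3]
      cases pvEl false rest <;> cases hq : decide (2 ≤ c) <;> cases h3 : decide (3 ≤ c) <;> simp

-- ===== VERDICT (by name: the statement is the Claim_ definition above) =====
theorem tem_dois_blocos_py_spec : Claim_equal_tem_dois_blocos_py := by
  unfold Claim_equal_tem_dois_blocos_py
  intro jogo _
  unfold Spec_tem_dois_blocos_py tem_dois_blocos_py tem_dois_blocos_py_alt
  cases hnums : PySem.List.sorted jogo (fun x => x) false with
  | nil =>
    dsimp only
    simp [PySem.List.pyRange_one_eq_nil]
  | cons prev xs =>
    dsimp only
    -- A side: blocos = filter (2 ≤ ·) (pvValsGo prev 1 xs)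
    have hlen : (prev :: xs).length - 1 = xs.length := by simp
    have hA : (PySem.List.pyRange 0 (((prev :: xs).length : Int) - 1) 1).foldl
        (fun s i => pvGA s (PySem.List.pyGetD (prev :: xs) i 0)
          (PySem.List.pyGetD (prev :: xs) (i + 1) 0)) ([], 1)
        = pvAdjFold pvGA prev xs ([], 1) := by
      rw [pv_pyrange_fold, hlen, pv_idx_fold]
    simp only [pvGA] at hA
    rw [hA]
    rw [pv_main xs prev [] 1, List.nil_append]
    -- B side: steps / starts / longs in terms of pvSteps
    have hdrop : (prev :: xs).drop 1 = xs := rfl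
    rw [hdrop, pv_steps_eq xs prev, pv_count_starts (pvSteps prev xs) false,
      pv_any_longs (pvSteps prev xs) false]
    -- assemble
    rw [pv_max_ge3, pv_any_filter, pv_any3_hd xs prev 1,
      pv_hd_el (pvSteps prev xs) 1 (by omega), pv_filter_len xs prev 1 (by omega)]
    have hq2 : decide ((2:Int) ≤ 1) = false := by simp only [decide_eq_false_iff_not]; omega
    have hq3 : decide ((3:Int) ≤ 1) = false := by simp only [decide_eq_false_iff_not]; omega
    rw [hq2, hq3]
    simp
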